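-- pv_equiv track=rewrite | github.com/withcoffee-code/travel-settlement-streamlit | app.py | split_amount_exact
-- ===== SOURCE A (Python) =====
-- def split_amount_exact(amount: int, people: list[str]) -> dict[str, int]:
--     n = len(people)
--     if n <= 0:
--         return {}
--     base = amount // n
--     rem = amount % n
--     shares = {p: base for p in people}
--     for i in range(rem):
--         shares[people[i]] += 1
--     return shares
-- ===== SOURCE B (Python) =====
-- def split_amount_exact(amount: int, people: list[str]) -> dict[str, int]:
--     n = len(people)
--     if n <= 0:
--         return {}
--     return {p: (amount + n - 1 - i) // n for i, p in enumerate(people)}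
-- ===== Notes on version B (the rewrite author's own statement) =====
-- stated objective: simpler
-- what changed: Replaces A's init-everyone-then-increment-the-first-rem loop by a single closed-form dict comprehension, share_i = (amount + n - 1 - i) // n; Pre_ excludes lists where a duplicated name falls among the first rem positions, on which A's piling of several +1 increments onto one dict-dedup'd key is an accident of dict semantics (B keeps the last occurrence's share).
-- outside the precondition, e.g. on split_amount_exact(4, ['a', 'b', 'a']): A returns {'a': 2, 'b': 1}, B returns {'a': 1, 'b': 1}
import Mathlib
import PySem

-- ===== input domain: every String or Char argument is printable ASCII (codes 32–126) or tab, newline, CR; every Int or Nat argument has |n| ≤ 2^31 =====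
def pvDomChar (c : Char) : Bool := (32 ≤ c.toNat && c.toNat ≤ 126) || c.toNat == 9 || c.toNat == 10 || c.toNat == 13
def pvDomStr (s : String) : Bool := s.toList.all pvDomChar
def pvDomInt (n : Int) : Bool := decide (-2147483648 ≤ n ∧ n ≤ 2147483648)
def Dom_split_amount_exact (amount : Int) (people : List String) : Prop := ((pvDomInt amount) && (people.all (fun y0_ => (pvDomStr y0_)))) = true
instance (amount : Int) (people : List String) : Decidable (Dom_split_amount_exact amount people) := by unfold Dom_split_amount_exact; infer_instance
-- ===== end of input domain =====

-- B: one closed-form dict comprehension, share_i = (amount + n - 1 - i) // n, instead of A's init-then-remainder-increment loop (simpler, same cost).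

-- ===== PORT A =====
def split_amount_exact (amount : Int) (people : List String) : List (String × Int) :=
  let n : Int := (people.length : Int)
  if n ≤ 0 then []
  else
    let base := PySem.Int.floordiv amount n
    let rem := PySem.Int.mod amount n
    let shares : PySem.Dict String Int :=
      people.foldl (fun d p => d.insert p base) PySem.Dict.empty
    let shares :=
      (PySem.List.pyRange 0 rem 1).foldl
        (fun d i => d.modify (PySem.List.pyGetD people i "") 0 (· + 1)) shares
    shares.items

-- ===== PORT B =====
def split_amount_exact_alt (amount : Int) (people : List String) : List (String × Int) :=
  let n : Int := (people.length : Int)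
  if n ≤ 0 then []
  else
    ((PySem.List.enumerate people).foldl
        (fun d ip => d.insert ip.2 (PySem.Int.floordiv (amount + n - 1 - ip.1) n))
        (PySem.Dict.empty : PySem.Dict String Int)).items

-- ===== PRECONDITION & SPEC =====
-- Pre_ excludes lists in which a duplicated name occurs among the first rem = amount % n positions:
-- there A piles several +1 remainder increments onto the one dict-dedup'd key (an accident of dict
-- semantics), while B keeps the last occurrence's closed-form share; both values are accidental.
def Pre_split_amount_exact (amount : Int) (people : List String) : Prop :=
  people = [] ∨
    ∀ p ∈ people.take (PySem.Int.mod amount (people.length : Int)).toNat, people.count p = 1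
instance (amount : Int) (people : List String) : Decidable (Pre_split_amount_exact amount people) := by unfold Pre_split_amount_exact; infer_instance
def pvWitness_split_amount_exact : Int × List String := (7, ["a", "b", "c"])
def Spec_split_amount_exact (amount : Int) (people : List String) (out : List (String × Int)) : Prop := out = split_amount_exact_alt amount people
instance (amount : Int) (people : List String) (out : List (String × Int)) : Decidable (Spec_split_amount_exact amount people out) := by unfold Spec_split_amount_exact; infer_instance

-- ===== CLAIM (what is proved, stated in full; the proofs are below) =====
def Claim_equal_split_amount_exact : Prop := ∀ (amount : Int) (people : List String), Dom_split_amount_exact amount people → Pre_split_amount_exact amount people → Spec_split_amount_exact amount people (split_amount_exact amount people)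

-- ===== LEMMAS AND PROOFS =====

-- getD after a fold of inserts whose value depends only on the key
theorem getD_foldl_insert_fun (g : String → Int) (l : List String)
    (d : PySem.Dict String Int) (k : String) :
    (l.foldl (fun d p => d.insert p (g p)) d).getD k 0
      = if k ∈ l then g k else d.getD k 0 := by
  induction l generalizing d with
  | nil => simp
  | cons p t ih =>
    simp only [List.foldl_cons, ih, List.mem_cons]
    by_cases ht : k ∈ t
    · simp [ht]
    · by_cases hk : k = p
      · simp [hk, PySem.Dict.getD_insert_self]
      · simp [ht, hk, PySem.Dict.getD_insert]

-- a fold of inserts never touching key k leaves getD k unchanged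
theorem getD_foldl_insert_not_mem (g : Int × String → Int) (l : List (Int × String))
    (d : PySem.Dict String Int) (k : String) (hk : k ∉ l.map Prod.snd) :
    (l.foldl (fun d ip => d.insert ip.2 (g ip)) d).getD k 0 = d.getD k 0 := by
  induction l generalizing d with
  | nil => simp
  | cons ip t ih =>
    simp only [List.map_cons, List.mem_cons, not_or] at hk
    simp only [List.foldl_cons, ih _ hk.2, PySem.Dict.getD_insert, if_neg hk.1]

-- getD after a fold of inserts, when every insert at key k writes the same value v
theorem getD_foldl_insert_const (g : Int × String → Int) (l : List (Int × String))
    (d : PySem.Dict String Int) (k : String) (v : Int)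
    (hmem : k ∈ l.map Prod.snd)
    (hall : ∀ ip ∈ l, ip.2 = k → g ip = v) :
    (l.foldl (fun d ip => d.insert ip.2 (g ip)) d).getD k 0 = v := by
  induction l generalizing d with
  | nil => simp at hmem
  | cons ip t ih =>
    by_cases ht : k ∈ t.map Prod.snd
    · exact ih _ ht (fun q hq => hall q (List.mem_cons_of_mem _ hq))
    · have hk : ip.2 = k := by
        simp only [List.map_cons, List.mem_cons] at hmem
        tauto
      rw [List.foldl_cons, getD_foldl_insert_not_mem _ _ _ _ ht, hk,
        PySem.Dict.getD_insert_self, hall ip List.mem_cons_self hk]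

-- the range loop of A is a fold of +1-modifications over the first rem people
theorem rangeFold (people : List String) (rem : Int) (d : PySem.Dict String Int)
    (h0 : 0 ≤ rem) (hn : rem ≤ (people.length : Int)) :
    (PySem.List.pyRange 0 rem 1).foldl
        (fun d i => d.modify (PySem.List.pyGetD people i "") 0 (· + 1)) d
      = (people.take rem.toNat).foldl (fun d x => d.modify x 0 (· + 1)) d := by
  generalize hgen : people.take rem.toNat = t
  have hlen : ((t.length : Int)) = rem := by
    simp [← hgen, List.length_take]
    omega
  have hcongr : ∀ (acc : PySem.Dict String Int) (i : Int), i ∈ PySem.List.pyRange 0 rem 1 →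
      acc.modify (PySem.List.pyGetD people i "") 0 (· + 1)
        = acc.modify (PySem.List.pyGetD t i "") 0 (· + 1) := by
    intro acc i hi
    rw [PySem.List.mem_pyRange_one] at hi
    have hget : PySem.List.pyGetD people i "" = PySem.List.pyGetD t i "" := by
      rw [PySem.List.pyGetD_eq_getElem people "" hi.1 (by omega),
        PySem.List.pyGetD_eq_getElem t "" hi.1 (by omega)]
      simp [← hgen, List.getElem_take]
    rw [hget]
  rw [PySem.List.foldl_congr_mem _ _ _ _ hcongr, ← hlen]
  exact PySem.List.foldl_pyRange_zero_pyGetD' t "" (fun d x => d.modify x 0 (· + 1)) d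

-- the closed-form share: for 0 ≤ i < n, (a + n - 1 - i) // n = a//n + (1 if i < a%n else 0)
theorem closed_form_share (a n i : Int) (hn : 0 < n) (hi : 0 ≤ i) (hin : i < n) :
    PySem.Int.floordiv (a + n - 1 - i) n
      = PySem.Int.floordiv a n + (if i < PySem.Int.mod a n then 1 else 0) := by
  have hdm := PySem.Int.floordiv_mul_add_mod a n
  have hr0 := PySem.Int.mod_nonneg a hn
  have hrn := PySem.Int.mod_lt a hn
  set q := PySem.Int.floordiv a n
  set r := PySem.Int.mod a n
  rw [PySem.Int.floordiv_eq_iff_of_pos hn]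
  by_cases h : i < r
  · rw [if_pos h]; constructor <;> nlinarith
  · rw [if_neg h]
    have h' : r ≤ i := not_lt.mp h
    constructor <;> nlinarith


-- ===== VERDICT (by name: the statement is the Claim_ definition above) =====
theorem split_amount_exact_spec : Claim_equal_split_amount_exact := by
  intro amount people _ hpre
  unfold Spec_split_amount_exact split_amount_exact split_amount_exact_alt
  by_cases hne : people = []
  · simp [hne]
  have hlen0 : 0 < (people.length : Int) := by
    have := List.length_pos_iff.mpr hne; exact_mod_cast this
  set n : Int := (people.length : Int) with hn
  rw [if_neg (by omega : ¬ n ≤ 0), if_neg (by omega : ¬ n ≤ 0)]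
  dsimp only
  set base := PySem.Int.floordiv amount n
  set rem := PySem.Int.mod amount n with hrem
  have hr0 : 0 ≤ rem := PySem.Int.mod_nonneg amount hlen0
  have hrn : rem < n := PySem.Int.mod_lt amount hlen0
  rw [rangeFold people rem _ hr0 (le_of_lt hrn)]
  set L := people.take rem.toNat with hL
  have hpre' : ∀ p ∈ L, people.count p = 1 := by
    rcases hpre with h | h
    · exact absurd h hne
    · exact h
  set dA1 : PySem.Dict String Int := people.foldl (fun d p => d.insert p base) PySem.Dict.empty with hdA1
  set dA : PySem.Dict String Int := L.foldl (fun d x => d.modify x 0 (· + 1)) dA1 with hdA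
  set dB : PySem.Dict String Int :=
    (PySem.List.enumerate people).foldl
      (fun d ip => d.insert ip.2 (PySem.Int.floordiv (amount + n - 1 - ip.1) n))
      PySem.Dict.empty with hdB
  -- keys
  have hkA1 : dA1.keys = PySem.Set.ofList people := by
    rw [hdA1, PySem.Dict.keys_foldl_insert, PySem.Dict.keys_empty, PySem.Set.update_nil_left]
  have hkA : dA.keys = PySem.Set.ofList people := by
    rw [hdA, PySem.Dict.keys_foldl_modify, hkA1, PySem.Set.update_eq_append_filter]
    have : (PySem.Set.ofList L).filter (fun y => !(PySem.Set.contains (PySem.Set.ofList people) y)) = [] := by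
      apply List.filter_eq_nil_iff.mpr
      intro y hy
      have : y ∈ people := List.mem_of_mem_take ((PySem.Set.mem_ofList L y).mp hy)
      simp [PySem.Set.contains, this]
    rw [this, List.append_nil]
  have hkB : dB.keys = PySem.Set.ofList people := by
    rw [hdB, PySem.Dict.keys_foldl_insert_key, PySem.Dict.keys_empty,
      PySem.List.map_snd_enumerate, PySem.Set.update_nil_left]
  -- values under Pre_: if k ∈ L it occurs once, at an index < rem; else all its indices are ≥ rem
  have hvA : ∀ k ∈ people, dA.getD k 0 = base + L.count k := by
    intro k hk
    rw [hdA, PySem.Dict.getD_foldl_modify_add_one, hdA1, getD_foldl_insert_fun]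
    simp [hk]
  have hvB : ∀ k ∈ people, dB.getD k 0 = base + L.count k := by
    intro k hk
    have hrnN : rem.toNat ≤ people.length := by omega
    have hkenum : k ∈ (PySem.List.enumerate people).map Prod.snd := by
      rw [PySem.List.map_snd_enumerate]; exact hk
    by_cases hkL : k ∈ L
    · -- k occurs exactly once, at an index < rem : every insert for k writes base + 1
      have hcnt1 : people.count k = 1 := hpre' k hkL
      have hLcnt : L.count k = 1 := by
        have h1 : 1 ≤ L.count k := List.count_pos_iff.mpr hkL
        have h2 : L.count k ≤ people.count k := by
          rw [hL]; exact (List.take_sublist _ _).count_le k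
        omega
      have hall : ∀ ip ∈ PySem.List.enumerate people, ip.2 = k →
          PySem.Int.floordiv (amount + n - 1 - ip.1) n = base + 1 := by
        intro ip hip hip2
        rcases (PySem.List.mem_enumerate_iff _ _ _).mp hip with ⟨j, hj, hpj⟩
        have hip1 : ip.1 = (j : Int) := by rw [hpj]; simp
        have hjk : people[j] = k := by rw [hpj] at hip2; simpa using hip2
        -- j < rem: otherwise k would occur both within L and at index j ≥ rem
        have hjrem : (j : Int) < rem := by
          by_contra hge
          rw [not_lt] at hge
          have hdrop : k ∈ people.drop rem.toNat := by
            rw [List.mem_drop_iff_getElem]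
            refine ⟨j - rem.toNat, by omega, ?_⟩
            have h2 : people[rem.toNat + (j - rem.toNat)]'(by omega) = people[j] := by
              congr 1; omega
            rw [h2, hjk]
          have hsplit : people.count k = L.count k + (people.drop rem.toNat).count k := by
            rw [hL, ← List.count_append, List.take_append_drop]
          have h3 : 1 ≤ (people.drop rem.toNat).count k := List.count_pos_iff.mpr hdrop
          omega
        rw [hip1, closed_form_share amount n j hlen0 (by omega) (by omega), if_pos hjrem]
      rw [hdB, getD_foldl_insert_const _ _ _ _ (base + 1) hkenum hall, hLcnt]
      norm_num
    · -- all occurrences of k sit at indices ≥ rem : every insert for k writes base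
      have hLcnt : L.count k = 0 := List.count_eq_zero.mpr hkL
      have hall : ∀ ip ∈ PySem.List.enumerate people, ip.2 = k →
          PySem.Int.floordiv (amount + n - 1 - ip.1) n = base := by
        intro ip hip hip2
        rcases (PySem.List.mem_enumerate_iff _ _ _).mp hip with ⟨j, hj, hpj⟩
        have hip1 : ip.1 = (j : Int) := by rw [hpj]; simp
        have hjk : people[j] = k := by rw [hpj] at hip2; simpa using hip2
        have hjrem : ¬ ((j : Int) < rem) := by
          intro hlt
          apply hkL
          rw [hL, List.mem_take_iff_getElem]
          exact ⟨j, by omega, hjk⟩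
        rw [hip1, closed_form_share amount n j hlen0 (by omega) (by omega), if_neg hjrem, add_zero]
      rw [hdB, getD_foldl_insert_const _ _ _ _ base hkenum hall, hLcnt]
      norm_num
  -- items
  have hnodup : (PySem.Set.ofList people).Nodup := PySem.Set.nodup_ofList people
  rw [PySem.Dict.items_eq_map_keys dA (by rw [hkA]; exact hnodup) 0,
      PySem.Dict.items_eq_map_keys dB (by rw [hkB]; exact hnodup) 0, hkA, hkB]
  apply List.map_congr_left
  intro k hk
  have hkp : k ∈ people := (PySem.Set.mem_ofList people k).mp hk
  rw [hvA k hkp, hvB k hkp]
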